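-- pv_equiv track=rewrite | github.com/KaushikNEU/Memory_Machines | src/part1_data/normalize_gutenberg.py | strip_gutenberg_boilerplate
-- ===== SOURCE A (Python) =====
-- def strip_gutenberg_boilerplate(text: str) -> str:
--     """
--     Lightly strip Gutenberg header/footer while keeping the body faithful.
--     This is optional, but it's a common pattern.
--     We *don't* do heavy cleaning; just remove clearly-marked boilerplate.
--     """
--     lines = text.splitlines()
--     start_idx = 0
--     end_idx = len(lines)
--
--     for i, line in enumerate(lines):
--         if "*** START OF THIS PROJECT GUTENBERG EBOOK" in line.upper():
--             start_idx = i + 1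
--             break
--
--     for j in range(len(lines) - 1, -1, -1):
--         if "*** END OF THIS PROJECT GUTENBERG EBOOK" in lines[j].upper():
--             end_idx = j
--             break
--
--     body = "\n".join(lines[start_idx:end_idx]).strip()
--     return body if body else text.strip()
-- ===== SOURCE B (Python) =====
-- def strip_gutenberg_boilerplate(text: str) -> str:
--     lines = text.splitlines()
--     start_idx = 0
--     end_idx = len(lines)
--     seen_start = False
--     for i, line in enumerate(lines):
--         u = line.upper()
--         if not seen_start and "*** START OF THIS PROJECT GUTENBERG EBOOK" in u:
--             seen_start = True
--             start_idx = i + 1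
--         if "*** END OF THIS PROJECT GUTENBERG EBOOK" in u:
--             end_idx = i
--     body = "\n".join(lines[start_idx:end_idx]).strip()
--     return body if body else text.strip()
-- ===== Notes on version B (the rewrite author's own statement) =====
-- stated objective: alternative
-- what changed: Replaces A's two directional break-scans (forward for the START marker, backward for the END marker) with a single forward enumerate pass that latches the first START index and overwrites the END index so the last match wins.
import Mathlib
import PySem

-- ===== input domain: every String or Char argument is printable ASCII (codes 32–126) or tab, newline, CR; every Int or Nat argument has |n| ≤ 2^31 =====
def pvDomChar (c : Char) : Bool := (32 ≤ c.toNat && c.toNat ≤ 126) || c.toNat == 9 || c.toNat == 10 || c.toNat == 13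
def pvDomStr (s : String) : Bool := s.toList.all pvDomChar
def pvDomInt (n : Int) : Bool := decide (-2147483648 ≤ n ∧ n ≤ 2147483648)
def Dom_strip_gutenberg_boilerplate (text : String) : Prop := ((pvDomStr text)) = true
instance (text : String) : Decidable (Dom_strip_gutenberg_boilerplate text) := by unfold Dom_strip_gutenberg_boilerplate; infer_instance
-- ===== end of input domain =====

-- B replaces A's two directional break-scans (forward for START, backward for END) by one
-- forward accumulating pass (objective: alternative decomposition; same cost).

def pvStartMarker : String := "*** START OF THIS PROJECT GUTENBERG EBOOK"
def pvEndMarker : String := "*** END OF THIS PROJECT GUTENBERG EBOOK"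

-- ===== PORT A =====
-- first loop: 'for i, line in enumerate(lines): if START in line.upper(): start_idx = i+1; break'
def pvAStartLoop : List (Int × String) → Int → Int
  | [], acc => acc
  | (i, line) :: rest, acc =>
    if PySem.Str.isIn pvStartMarker (PySem.Str.upper line) then i + 1
    else pvAStartLoop rest acc

-- second loop: 'for j in range(len(lines)-1, -1, -1): if END in lines[j].upper(): end_idx = j; break'
-- iterated as the reversed enumeration (same indices, same order, same break)
def pvAEndLoop : List (Int × String) → Int → Int
  | [], acc => acc
  | (j, line) :: rest, acc =>
    if PySem.Str.isIn pvEndMarker (PySem.Str.upper line) then j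
    else pvAEndLoop rest acc

def strip_gutenberg_boilerplate (text : String) : String :=
  let lines := PySem.Str.splitlines text
  let start_idx := pvAStartLoop (PySem.List.enumerate lines) 0
  let end_idx := pvAEndLoop (PySem.List.enumerate lines).reverse (lines.length : Int)
  let body := PySem.Str.strip (PySem.Str.join "\n" (PySem.List.slice lines (some start_idx) (some end_idx)))
  if body ≠ "" then body else PySem.Str.strip text

-- ===== PORT B =====
def pvAltStep : Bool × Int × Int → Int × String → Bool × Int × Int
  | (seen, s, e), (i, line) =>
    let u := PySem.Str.upper line
    let p := if !seen && PySem.Str.isIn pvStartMarker u then (true, i + 1) else (seen, s)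
    let e' := if PySem.Str.isIn pvEndMarker u then i else e
    (p.1, p.2, e')

def strip_gutenberg_boilerplate_alt (text : String) : String :=
  let lines := PySem.Str.splitlines text
  let st := (PySem.List.enumerate lines).foldl pvAltStep (false, 0, (lines.length : Int))
  let body := PySem.Str.strip (PySem.Str.join "\n" (PySem.List.slice lines (some st.2.1) (some st.2.2)))
  if body ≠ "" then body else PySem.Str.strip text

-- ===== PRECONDITION & SPEC =====
def Spec_strip_gutenberg_boilerplate (text : String) (out : String) : Prop := out = strip_gutenberg_boilerplate_alt text
instance (text : String) (out : String) : Decidable (Spec_strip_gutenberg_boilerplate text out) := by unfold Spec_strip_gutenberg_boilerplate; infer_instance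

-- ===== CLAIM (what is proved, stated in full; the proofs are below) =====
def Claim_equal_strip_gutenberg_boilerplate : Prop := ∀ (text : String), Dom_strip_gutenberg_boilerplate text → Spec_strip_gutenberg_boilerplate text (strip_gutenberg_boilerplate text)

-- ===== LEMMAS AND PROOFS =====

-- forward 'last match wins' accumulator
def pvLastQ : List (Int × String) → Int → Int
  | [], e => e
  | (i, line) :: rest, e =>
    pvLastQ rest (if PySem.Str.isIn pvEndMarker (PySem.Str.upper line) then i else e)

theorem pvAEndLoop_append_single (m : List (Int × String)) (x : Int × String) (d : Int) :
    pvAEndLoop (m ++ [x]) d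
      = pvAEndLoop m (if PySem.Str.isIn pvEndMarker (PySem.Str.upper x.2) then x.1 else d) := by
  induction m with
  | nil => simp [pvAEndLoop]
  | cons y rest ih =>
    obtain ⟨j, line⟩ := y
    cases h : PySem.Str.isIn pvEndMarker (PySem.Str.upper line) <;>
      simp at h <;>
      simp [pvAEndLoop, h, ih]

theorem pvLastQ_eq_aEnd (l : List (Int × String)) (e : Int) :
    pvLastQ l e = pvAEndLoop l.reverse e := by
  induction l generalizing e with
  | nil => simp [pvLastQ, pvAEndLoop]
  | cons x rest ih =>
    cases x with
    | mk i line =>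
      simp only [pvLastQ, List.reverse_cons, pvAEndLoop_append_single, ih]

theorem pvFold_spec (l : List (Int × String)) (seen : Bool) (s e : Int) :
    l.foldl pvAltStep (seen, s, e)
      = ((seen || l.any (fun p => PySem.Str.isIn pvStartMarker (PySem.Str.upper p.2))),
         (if seen then s else pvAStartLoop l s),
         pvLastQ l e) := by
  induction l generalizing seen s e with
  | nil => simp [pvAStartLoop, pvLastQ]
  | cons x rest ih =>
    obtain ⟨i, line⟩ := x
    cases hp : PySem.Str.isIn pvStartMarker (PySem.Str.upper line) <;>
      cases hq : PySem.Str.isIn pvEndMarker (PySem.Str.upper line) <;>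
        simp at hp hq <;>
        cases seen <;>
          simp [pvAltStep, pvAStartLoop, pvLastQ, hp, hq, ih]

-- ===== VERDICT (by name: the statement is the Claim_ definition above) =====
theorem strip_gutenberg_boilerplate_spec : Claim_equal_strip_gutenberg_boilerplate := by
  intro text _
  unfold Spec_strip_gutenberg_boilerplate strip_gutenberg_boilerplate strip_gutenberg_boilerplate_alt
  simp [pvFold_spec, pvLastQ_eq_aEnd]
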